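-- pv_equiv track=rewrite | github.com/NanFangXiJi/Rhythm_Dungeon | basic_func.py | obj_graphics_calculate
-- ===== SOURCE A (Python) =====
-- def obj_graphics_calculate(graphics_msg: str):
--     """
--     这是将从文件中读取的物体绘制方法转换为列表的方法
--     文件中的写法如下：
--         pic1,pic2,|,pic1,pic3,pic4,|,pic6,pic7
--     符号|用来分隔物品每一个状态的图片
--     符号,用来分隔所有意义上“不同的东西”
--     上面的最终会被转化为列表如下：
--         [['pic1','pic2'],['pic1','pic3','pic4'],['pic6','pic7']]
--     :param graphics_msg: 读取的绘制方法
--     :return: 绘制方法列表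
--     """
--     graphics_msg_list = graphics_msg.split(',')
--     graphics_list = []
--     temp_list = []
--     for msg in graphics_msg_list:
--         if msg == '|':
--             graphics_list.append(temp_list.copy())
--             temp_list = []
--         else:
--             temp_list.append(msg)
--     if len(temp_list) > 0:
--         graphics_list.append(temp_list)
--     del temp_list
--     return graphics_list
-- ===== SOURCE B (Python) =====
-- def obj_graphics_calculate(graphics_msg: str):
--     """Recursive split: locate the first '|' token, slice the group off, recurse
--     on the remainder; a trailing empty group (no '|' left, nothing left) is dropped."""
--     def groups(tokens):
--         try:
--             i = tokens.index('|')
--         except ValueError: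
--             return [tokens] if tokens else []
--         return [tokens[:i]] + groups(tokens[i + 1:])
--     return groups(graphics_msg.split(','))
-- ===== Notes on version B (the rewrite author's own statement) =====
-- stated objective: alternative
-- what changed: Replaces A's accumulate-and-flush pass with a per-token temp list by a recursive decomposition that locates the first separator token with list.index and slices whole groups off the token list.
import Mathlib
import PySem

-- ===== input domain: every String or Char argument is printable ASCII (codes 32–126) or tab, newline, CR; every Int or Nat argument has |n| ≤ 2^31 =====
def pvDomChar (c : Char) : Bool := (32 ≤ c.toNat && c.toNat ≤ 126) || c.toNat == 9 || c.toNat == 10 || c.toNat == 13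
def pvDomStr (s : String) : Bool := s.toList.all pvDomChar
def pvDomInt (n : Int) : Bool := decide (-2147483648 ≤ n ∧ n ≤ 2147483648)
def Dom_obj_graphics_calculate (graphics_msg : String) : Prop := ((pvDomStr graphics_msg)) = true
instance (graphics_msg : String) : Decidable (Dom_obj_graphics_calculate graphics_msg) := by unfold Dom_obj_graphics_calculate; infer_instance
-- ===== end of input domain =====

-- B replaces A's accumulate-and-flush loop with a recursive find-first-'|'-and-slice decomposition (alternative, same cost).


-- ===== PORT A =====
-- A's for-loop over the comma-split tokens, with graphics_list/temp_list state.
def pvLoopA : List String → List (List String) → List String → List (List String)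
  | [], acc, temp => if temp.length > 0 then acc ++ [temp] else acc
  | m :: rest, acc, temp =>
      if m == "|" then pvLoopA rest (acc ++ [temp]) []
      else pvLoopA rest acc (temp ++ [m])

def obj_graphics_calculate (graphics_msg : String) : List (List String) :=
  pvLoopA ((PySem.Str.split? graphics_msg ",").getD []) [] []

-- ===== PORT B =====
-- Source B's recursive groups(): try tokens.index('|') (none = ValueError branch),
-- slice the first group off, recurse on the rest.
def pvGroupsB (tokens : List String) : List (List String) :=
  match hi : PySem.List.index? tokens "|" with
  | none => if tokens = [] then [] else [tokens]
  | some i =>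
      PySem.List.slice tokens none (some (i : Int)) ::
        pvGroupsB (PySem.List.slice tokens (some ((i : Int) + 1)) none)
termination_by tokens.length
decreasing_by
  obtain ⟨hk, _⟩ := PySem.List.getElem_of_index?_eq_some hi
  have h1 : ((i : Int) + 1) = ((i + 1 : Nat) : Int) := by push_cast; ring
  rw [h1, PySem.List.slice_from_natCast]
  simp only [List.length_drop]
  omega

def obj_graphics_calculate_alt (graphics_msg : String) : List (List String) :=
  pvGroupsB ((PySem.Str.split? graphics_msg ",").getD [])

-- ===== PRECONDITION & SPEC =====
def Spec_obj_graphics_calculate (graphics_msg : String) (out : List (List String)) : Prop := out = obj_graphics_calculate_alt graphics_msg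
instance (graphics_msg : String) (out : List (List String)) : Decidable (Spec_obj_graphics_calculate graphics_msg out) := by unfold Spec_obj_graphics_calculate; infer_instance

-- ===== CLAIM (what is proved, stated in full; the proofs are below) =====
def Claim_equal_obj_graphics_calculate : Prop := ∀ (graphics_msg : String), Dom_obj_graphics_calculate graphics_msg → Spec_obj_graphics_calculate graphics_msg (obj_graphics_calculate graphics_msg)

-- ===== LEMMAS AND PROOFS =====

-- Accumulator-free description of A's loop: pvG temp ts = groups still to be emitted.
def pvG : List String → List String → List (List String)
  | temp, [] => if temp.length > 0 then [temp] else []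
  | temp, m :: rest => if m == "|" then temp :: pvG [] rest else pvG (temp ++ [m]) rest

theorem pvLoopA_eq (ts : List String) : ∀ acc temp, pvLoopA ts acc temp = acc ++ pvG temp ts := by
  induction ts with
  | nil =>
      intro acc temp
      by_cases h : temp.length > 0 <;> simp [pvLoopA, pvG, h]
  | cons m rest ih =>
      intro acc temp
      by_cases h : m == "|" <;> simp [pvLoopA, pvG, h, ih]

-- pvGroupsB with the slices rewritten to take/drop.
theorem pvGroupsB_unfold (ts : List String) :
    pvGroupsB ts =
      match PySem.List.index? ts "|" with
      | none => if ts = [] then [] else [ts]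
      | some i => ts.take i :: pvGroupsB (ts.drop (i + 1)) := by
  rw [pvGroupsB]
  split
  · rename_i hi; rw [hi]
  · rename_i i hi
    rw [hi]
    have h1 : ((i : Int) + 1) = ((i + 1 : Nat) : Int) := by push_cast; ring
    rw [h1, PySem.List.slice_from_natCast, PySem.List.slice_to_natCast]

theorem pvG_eq (ts : List String) : ∀ temp, pvG temp ts =
    match PySem.List.index? ts "|" with
    | none => if temp ++ ts = [] then [] else [temp ++ ts]
    | some i => (temp ++ ts.take i) :: pvGroupsB (ts.drop (i + 1)) := by
  induction ts with
  | nil =>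
      intro temp
      simp only [PySem.List.index?_eq_idxOf?, List.idxOf?_nil, List.append_nil, pvG]
      by_cases h : temp = [] <;> simp [h, List.length_pos_iff]
  | cons m rest ih =>
      intro temp
      by_cases h : m = "|"
      · subst h
        rw [PySem.List.index?_cons_self]
        have hrest : pvG [] rest = pvGroupsB rest := by
          rw [ih [], pvGroupsB_unfold rest]
          cases hr : PySem.List.index? rest "|" <;> simp
        simp [pvG, hrest]
      · have hbe : (m == "|") = false := by simpa using h
        simp only [pvG, hbe, Bool.false_eq_true, if_false]
        rw [ih (temp ++ [m]), PySem.List.index?_cons_of_ne rest h]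
        cases hr : PySem.List.index? rest "|" <;>
          simp [List.take_succ_cons, List.drop_succ_cons]

-- ===== VERDICT (by name: the statement is the Claim_ definition above) =====
theorem obj_graphics_calculate_spec : Claim_equal_obj_graphics_calculate := by
  intro s _
  unfold Spec_obj_graphics_calculate obj_graphics_calculate obj_graphics_calculate_alt
  rw [pvLoopA_eq, pvG_eq, pvGroupsB_unfold]
  cases hi : PySem.List.index? ((PySem.Str.split? s ",").getD []) "|" <;> simp
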